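-- pv_equiv track=rewrite | github.com/KamozZze/Programming0 | week4/9. Winter-Is-Coming/winter.py | winter_is_coming
-- ===== SOURCE A (Python) =====
-- def winter_is_coming(seasons):
--
-- 	index = 0
-- 	end = len(seasons)
-- 	counter = 0
--
-- 	while index < end:
-- 		if seasons[index] == 'winter':
-- 			counter = 0
-- 		else:
-- 			counter += 1
-- 		if counter >= 5:
-- 			return True
--
--
-- 		index += 1
--
-- 	return False
-- ===== SOURCE B (Python) =====
-- def _runs(seasons):
--     """Run-length encode seasons by whether each entry equals 'winter'."""
--     if not seasons:
--         return []
--     runs = []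
--     key = seasons[0] == 'winter'
--     length = 1
--     for s in seasons[1:]:
--         k = s == 'winter'
--         if k == key:
--             length += 1
--         else:
--             runs.append((key, length))
--             key, length = k, 1
--     runs.append((key, length))
--     return runs
--
--
-- def winter_is_coming(seasons):
--     return any((not is_winter) and length >= 5
--                for is_winter, length in _runs(seasons))
-- ===== Notes on version B (the rewrite author's own statement) =====
-- stated objective: alternative
-- what changed: A scans with an index and a reset counter, returning early; B first run-length-encodes the list into maximal runs keyed by (s == 'winter') and then asks whether any non-winter run has length >= 5.
import Mathlib
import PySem

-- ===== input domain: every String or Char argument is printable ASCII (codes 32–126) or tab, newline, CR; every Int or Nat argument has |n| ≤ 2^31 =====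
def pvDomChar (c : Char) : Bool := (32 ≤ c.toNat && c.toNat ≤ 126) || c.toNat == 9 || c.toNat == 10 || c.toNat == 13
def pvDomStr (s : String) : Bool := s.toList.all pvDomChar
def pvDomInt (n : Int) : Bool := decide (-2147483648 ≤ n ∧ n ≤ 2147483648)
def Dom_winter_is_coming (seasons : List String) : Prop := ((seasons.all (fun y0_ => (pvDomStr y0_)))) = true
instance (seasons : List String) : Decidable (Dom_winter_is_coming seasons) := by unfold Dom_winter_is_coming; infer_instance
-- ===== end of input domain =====

-- B replaces A's index/counter scan with an explicit run-length encoding of the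
-- list keyed by (s == 'winter') followed by an any-run-long-enough test (same cost).

-- ===== PORT A =====
-- A's while loop over `index` with early return, counter is a Python int.
def winterLoopA (seasons : List String) (index : Nat) (counter : Int) : Bool :=
  if _h : index < seasons.length then
    let counter := if seasons.getD index "" == "winter" then 0 else counter + 1
    if counter ≥ 5 then true
    else winterLoopA seasons (index + 1) counter
  else false
termination_by seasons.length - index

def winter_is_coming (seasons : List String) : Bool :=
  winterLoopA seasons 0 0

-- ===== PORT B =====
-- _runs: run-length encode, carrying the current run (key, length); emits runs in order.
def runsFrom (key : Bool) (length : Nat) : List String → List (Bool × Nat)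
  | [] => [(key, length)]
  | s :: rest =>
    let k := s == "winter"
    if k == key then runsFrom key (length + 1) rest
    else (key, length) :: runsFrom k 1 rest

def pyRuns : List String → List (Bool × Nat)
  | [] => []
  | s :: rest => runsFrom (s == "winter") 1 rest

def winter_is_coming_alt (seasons : List String) : Bool :=
  (pyRuns seasons).any (fun p => (!p.1) && decide (p.2 ≥ 5))

-- ===== PRECONDITION & SPEC =====
def Spec_winter_is_coming (seasons : List String) (out : Bool) : Prop := out = winter_is_coming_alt seasons
instance (seasons : List String) (out : Bool) : Decidable (Spec_winter_is_coming seasons out) := by unfold Spec_winter_is_coming; infer_instance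

-- ===== CLAIM (what is proved, stated in full; the proofs are below) =====
def Claim_equal_winter_is_coming : Prop := ∀ (seasons : List String), Dom_winter_is_coming seasons → Spec_winter_is_coming seasons (winter_is_coming seasons)

-- ===== LEMMAS AND PROOFS =====

-- A's loop over the suffix of the list, as a list recursion (proof-only restatement).
def loopList : List String → Int → Bool
  | [], _ => false
  | s :: rest, c =>
    let c' : Int := if s == "winter" then 0 else c + 1
    if c' ≥ 5 then true else loopList rest c'

theorem winterLoopA_eq_loopList (seasons : List String) (index : Nat) (counter : Int) :
    winterLoopA seasons index counter = loopList (seasons.drop index) counter := by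
  rw [winterLoopA]
  by_cases hlt : index < seasons.length
  · rw [dif_pos hlt]
    have hd : seasons.drop index = seasons[index] :: seasons.drop (index + 1) :=
      List.drop_eq_getElem_cons hlt
    have hgd : seasons.getD index "" = seasons[index] := List.getD_eq_getElem seasons "" hlt
    rw [hd, hgd]
    simp only [loopList]
    by_cases h5 : (if (seasons[index] == "winter") then (0 : Int) else counter + 1) ≥ 5
    · rw [if_pos h5, if_pos h5]
    · rw [if_neg h5, if_neg h5]
      exact winterLoopA_eq_loopList seasons (index + 1) _
  · rw [dif_neg hlt, List.drop_eq_nil_of_le (by omega)]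
    rfl
termination_by seasons.length - index
decreasing_by omega

-- once the counter reaches 5 inside a non-winter run, the finished run is ≥ 5 too
theorem runsFrom_big (l : List String) : ∀ n, 5 ≤ n →
    (runsFrom false n l).any (fun p => (!p.1) && decide (p.2 ≥ 5)) = true := by
  induction l with
  | nil => intro n hn; simp [runsFrom]; omega
  | cons s rest ih =>
    intro n hn
    cases hsk : (s == "winter") with
    | false => simpa [runsFrom, hsk] using ih (n + 1) (by omega)
    | true => simp [runsFrom, hsk]; left; omega

-- main correspondence: A's counter c matches B's current run (key, length)
theorem loop_eq_runs (l : List String) :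
    ∀ (key : Bool) (length : Nat) (c : Int),
      (if key then c = 0 else c = (length : Int) ∧ length < 5) →
      loopList l c = (runsFrom key length l).any (fun p => (!p.1) && decide (p.2 ≥ 5)) := by
  induction l with
  | nil =>
    intro key length c hc
    cases key with
    | true => simp [loopList, runsFrom]
    | false =>
      obtain ⟨hc0, hl5⟩ : c = (length : Int) ∧ length < 5 := by simpa using hc
      simp [loopList, runsFrom]; omega
  | cons s rest ih =>
    intro key length c hc
    simp only [loopList, runsFrom]
    cases hsk : (s == "winter") with
    | true =>
      cases key with
      | true =>
        have hc0 : c = 0 := by simpa using hc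
        subst hc0
        norm_num
        exact ih true (length + 1) 0 (by simp)
      | false =>
        obtain ⟨hc0, hl5⟩ : c = (length : Int) ∧ length < 5 := by simpa using hc
        norm_num [List.any_cons]
        rw [decide_eq_false (by omega), Bool.false_or]
        exact ih true 1 0 (by simp)
    | false =>
      cases key with
      | true =>
        have hc0 : c = 0 := by simpa using hc
        subst hc0
        norm_num [List.any_cons]
        exact ih false 1 1 (by norm_num)
      | false =>
        obtain ⟨hc0, hl5⟩ : c = (length : Int) ∧ length < 5 := by simpa using hc
        norm_num
        by_cases h5 : c + 1 ≥ 5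
        · rw [decide_eq_true (by omega : (5:Int) ≤ c + 1), Bool.true_or]
          exact (runsFrom_big rest (length + 1) (by omega)).symm
        · rw [decide_eq_false (by omega : ¬ (5:Int) ≤ c + 1), Bool.false_or]
          exact ih false (length + 1) (c + 1)
            (by norm_num; exact ⟨by omega, by omega⟩)

-- ===== VERDICT (by name: the statement is the Claim_ definition above) =====
theorem winter_is_coming_spec : Claim_equal_winter_is_coming := by
  intro seasons _
  unfold Spec_winter_is_coming winter_is_coming winter_is_coming_alt
  rw [winterLoopA_eq_loopList seasons 0 0, List.drop_zero]
  cases seasons with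
  | nil => rfl
  | cons s rest =>
    simp only [loopList, pyRuns]
    cases hsk : (s == "winter") with
    | true =>
      norm_num
      exact loop_eq_runs rest true 1 0 (by simp)
    | false =>
      norm_num
      exact loop_eq_runs rest false 1 1 (by norm_num)
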